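-- pv_equiv track=rewrite | github.com/uoRetr0/Enliven | character_chat.py | _preprocess_character_names
-- ===== SOURCE A (Python) =====
-- def _preprocess_character_names(names: list[str]) -> dict[str, str]:
--     """Quick substring-based merging before LLM call for obvious matches."""
--     if not names:
--         return {}
--
--     # Sort by length descending so longer names are processed first
--     sorted_names = sorted(names, key=len, reverse=True)
--     canonical_map: dict[str, str] = {}  # Maps normalized form to canonical name
--
--     for name in sorted_names:
--         lower = name.lower().strip()
--         matched = False
--
--         for existing_name, canonical_lower in list(canonical_map.items()):
--             # Check if one is substring of the other
--             if lower in canonical_lower or canonical_lower in lower: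
--                 # Use the longer name as canonical
--                 if len(name) > len(existing_name):
--                     # Update canonical to use this longer name
--                     canonical_map[name] = lower
--                     # Update all names that pointed to the old canonical
--                     for k, v in list(canonical_map.items()):
--                         if v == canonical_lower:
--                             canonical_map[k] = lower
--                 else:
--                     canonical_map[name] = canonical_lower
--                 matched = True
--                 break
--
--         if not matched:
--             canonical_map[name] = lower
--
--     # Build final mapping: name -> canonical name (the longest one)
--     result: dict[str, str] = {}
--     for name in names:
--         canonical_lower = canonical_map.get(name, name.lower())
--         # Find the longest name that maps to this canonical form
--         canonical_name = max(
--             (n for n in names if canonical_map.get(n) == canonical_lower),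
--             key=len,
--             default=name
--         )
--         result[name] = canonical_name
--
--     return result
-- ===== SOURCE B (Python) =====
-- def _preprocess_character_names(names: list[str]) -> dict[str, str]:
--     """Quick substring-based merging before LLM call for obvious matches."""
--     if not names:
--         return {}
--
--     # Phase 1: process names longest-first; each name adopts the first earlier
--     # canonical form it overlaps with (substring either way), else its own.
--     canonical_map: dict[str, str] = {}
--     for name in sorted(names, key=len, reverse=True):
--         lower = name.lower().strip()
--         canonical_map[name] = next(
--             (v for v in canonical_map.values() if lower in v or v in lower),
--             lower,
--         )
--
--     # Phase 2: one pass builds, per canonical form, its longest name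
--     # (first wins on ties), replacing the per-name max() scans.
--     index: dict[str, str] = {}
--     for n in names:
--         cl = canonical_map.get(n, n.lower())
--         if cl not in index or len(n) > len(index[cl]):
--             index[cl] = n
--
--     return {name: index.get(canonical_map.get(name, name.lower()), name)
--             for name in names}
-- ===== Notes on version B (the rewrite author's own statement) =====
-- stated objective: faster
-- what changed: Phase 1's dead longer-name branch (unreachable because names are processed in descending length order) is dropped in favour of a first-match lookup over stored canonical values, and phase 2's per-name max() scan over all names is replaced by one pass that builds a canonical->longest-name index (strict-greater replacement keeps max's first-on-tie winner) followed by O(1) lookups.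
import Mathlib
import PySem

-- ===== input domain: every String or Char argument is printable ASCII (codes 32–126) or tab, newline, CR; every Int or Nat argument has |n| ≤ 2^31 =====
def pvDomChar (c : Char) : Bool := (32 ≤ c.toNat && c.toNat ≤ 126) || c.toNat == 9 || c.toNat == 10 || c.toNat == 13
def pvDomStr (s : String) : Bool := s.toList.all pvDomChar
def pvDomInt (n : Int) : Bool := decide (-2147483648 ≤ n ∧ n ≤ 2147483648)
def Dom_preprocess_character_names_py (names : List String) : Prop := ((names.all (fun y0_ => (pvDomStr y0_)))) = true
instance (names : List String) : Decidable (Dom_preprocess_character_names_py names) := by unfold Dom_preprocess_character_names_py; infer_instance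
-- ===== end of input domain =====

-- B drops phase 1's unreachable longer-name branch and replaces phase 2's per-name
-- max() scans by a single canonical->longest-name index pass (measured faster).

-- ===== PORT A =====
-- inner 'for existing_name, canonical_lower in list(canonical_map.items()): … break'
def pvMatchA (lower : String) : List (String × String) → Option (String × String)
  | [] => none
  | (existing_name, canonical_lower) :: rest =>
    if PySem.Str.isIn lower canonical_lower || PySem.Str.isIn canonical_lower lower then
      some (existing_name, canonical_lower)
    else pvMatchA lower rest

-- one iteration of A's phase-1 loop body
def pvStepA (cm : PySem.Dict String String) (name : String) : PySem.Dict String String :=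
  let lower := PySem.Str.strip (PySem.Str.lower name)
  match pvMatchA lower cm.items with
  | some (existing_name, canonical_lower) =>
      if PySem.Str.len existing_name < PySem.Str.len name then
        -- canonical_map[name] = lower; then repair every entry pointing at the old canonical
        let cm1 := cm.insert name lower
        cm1.items.foldl (fun acc kv => if kv.2 == canonical_lower then acc.insert kv.1 lower else acc) cm1
      else cm.insert name canonical_lower
  | none => cm.insert name lower

def preprocess_character_names_py (names : List String) : List (String × String) :=
  if names = [] then []
  else
    let sorted_names := PySem.List.sorted names (fun s => PySem.Str.len s) true
    let cm := sorted_names.foldl pvStepA PySem.Dict.empty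
    (names.foldl (fun (result : PySem.Dict String String) name =>
        let canonical_lower := cm.getD name (PySem.Str.lower name)
        let canonical_name := PySem.List.maxD
            (names.filter (fun n => cm.get? n == some canonical_lower))
            (fun s => PySem.Str.len s) name
        result.insert name canonical_name) PySem.Dict.empty).items

-- ===== PORT B =====
-- B's canonical choice: first stored canonical value that overlaps, else the lowered stripped name
def pvCanonB (cm : PySem.Dict String String) (name : String) : String :=
  (cm.values.find? (fun v =>
      PySem.Str.isIn (PySem.Str.strip (PySem.Str.lower name)) v ||
      PySem.Str.isIn v (PySem.Str.strip (PySem.Str.lower name)))).getD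
    (PySem.Str.strip (PySem.Str.lower name))

-- one iteration of B's phase-1 loop body
def pvStepB (cm : PySem.Dict String String) (name : String) : PySem.Dict String String :=
  cm.insert name (pvCanonB cm name)

def preprocess_character_names_py_alt (names : List String) : List (String × String) :=
  if names = [] then []
  else
    let cm := (PySem.List.sorted names (fun s => PySem.Str.len s) true).foldl pvStepB PySem.Dict.empty
    let index := names.foldl (fun (idx : PySem.Dict String String) n =>
        let cl := cm.getD n (PySem.Str.lower n)
        match idx.get? cl with
        | none => idx.insert cl n
        | some cur => if PySem.Str.len cur < PySem.Str.len n then idx.insert cl n else idx)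
      PySem.Dict.empty
    (names.foldl (fun (r : PySem.Dict String String) name =>
        r.insert name (index.getD (cm.getD name (PySem.Str.lower name)) name))
      PySem.Dict.empty).items

-- ===== PRECONDITION & SPEC =====
def Spec_preprocess_character_names_py (names : List String) (out : List (String × String)) : Prop := out = preprocess_character_names_py_alt names
instance (names : List String) (out : List (String × String)) : Decidable (Spec_preprocess_character_names_py names out) := by unfold Spec_preprocess_character_names_py; infer_instance

-- ===== CLAIM (what is proved, stated in full; the proofs are below) =====
def Claim_equal_preprocess_character_names_py : Prop := ∀ (names : List String), Dom_preprocess_character_names_py names → Spec_preprocess_character_names_py names (preprocess_character_names_py names)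

-- ===== LEMMAS AND PROOFS =====


theorem pvMatchA_eq_find? (lower : String) (l : List (String × String)) :
    pvMatchA lower l
      = l.find? (fun p => PySem.Str.isIn lower p.2 || PySem.Str.isIn p.2 lower) := by
  induction l with
  | nil => rfl
  | cons p rest ih =>
    obtain ⟨en, cl⟩ := p
    rw [pvMatchA, List.find?_cons]
    cases h1 : PySem.Chars.isIn lower.toList cl.toList <;>
      cases h2 : PySem.Chars.isIn cl.toList lower.toList <;>
        simp [PySem.Str.isIn, h1, h2, ih]

theorem pvStep_eq (cm : PySem.Dict String String) (name : String)
    (h : ∀ p ∈ cm.items, PySem.Str.len name ≤ PySem.Str.len p.1) :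
    pvStepA cm name = pvStepB cm name := by
  unfold pvStepA pvStepB pvCanonB
  dsimp only
  rw [pvMatchA_eq_find?]
  have hv : cm.values.find? (fun v =>
        PySem.Str.isIn (PySem.Str.strip (PySem.Str.lower name)) v ||
        PySem.Str.isIn v (PySem.Str.strip (PySem.Str.lower name)))
      = (cm.items.find? (fun p =>
          PySem.Str.isIn (PySem.Str.strip (PySem.Str.lower name)) p.2 ||
          PySem.Str.isIn p.2 (PySem.Str.strip (PySem.Str.lower name)))).map (·.2) := by
    have hvals : cm.values = cm.items.map (·.2) := rfl
    rw [hvals, List.find?_map]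
    rfl
  rw [hv]
  cases hfind : cm.items.find? (fun p =>
      PySem.Str.isIn (PySem.Str.strip (PySem.Str.lower name)) p.2 ||
      PySem.Str.isIn p.2 (PySem.Str.strip (PySem.Str.lower name))) with
  | none => rfl
  | some p =>
    obtain ⟨en, cl⟩ := p
    have hmem : (en, cl) ∈ cm.items := List.mem_of_find?_eq_some hfind
    have hle : PySem.Str.len name ≤ PySem.Str.len en := h _ hmem
    simp only [Option.map_some, Option.getD_some]
    rw [if_neg (not_lt.mpr hle)]

theorem pvFold_eq (l : List String) (cm : PySem.Dict String String)
    (hp : l.Pairwise (fun a b => PySem.Str.len b ≤ PySem.Str.len a))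
    (hlen : ∀ x ∈ l, ∀ p ∈ cm.items, PySem.Str.len x ≤ PySem.Str.len p.1) :
    l.foldl pvStepA cm = l.foldl pvStepB cm := by
  induction l generalizing cm with
  | nil => rfl
  | cons x t ih =>
    rw [List.pairwise_cons] at hp
    rw [List.foldl_cons, List.foldl_cons, pvStep_eq cm x (hlen x (by simp))]
    refine ih _ hp.2 ?_
    intro y hy p hpmem
    rw [pvStepB] at hpmem
    rcases (PySem.Dict.mem_items_insert _ _ _ _).mp hpmem with hpx | hpold
    · rw [hpx]
      exact hp.1 y hy
    · exact hlen y (List.mem_cons_of_mem _ hy) p hpold.1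

theorem pvIdx_lemma (key : String → String) (l : List String) (idx : PySem.Dict String String) (cl : String) :
    (l.foldl (fun idx n =>
        match idx.get? (key n) with
        | none => idx.insert (key n) n
        | some cur => if PySem.Str.len cur < PySem.Str.len n then idx.insert (key n) n else idx) idx).get? cl
    = (l.filter (fun n => key n == cl)).foldl
        (fun acc n => match acc with
          | none => some n
          | some m => if PySem.Str.len m < PySem.Str.len n then some n else some m)
        (idx.get? cl) := by
  induction l generalizing idx with
  | nil => rfl
  | cons n t ih =>
    rw [List.foldl_cons, List.filter_cons]
    by_cases hcl : key n = cl
    · rw [if_pos (by simp [hcl]), List.foldl_cons, hcl]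
      cases hg : idx.get? cl with
      | none =>
        rw [ih]
        dsimp only
        rw [PySem.Dict.get?_insert_self]
      | some cur =>
        by_cases hlt : PySem.Str.len cur < PySem.Str.len n
        · rw [ih]
          dsimp only
          rw [if_pos hlt, if_pos hlt, PySem.Dict.get?_insert_self]
        · rw [ih]
          dsimp only
          rw [if_neg hlt, if_neg hlt, hg]
    · rw [if_neg (by simp [hcl])]
      have hne : cl ≠ key n := fun hh => hcl hh.symm
      cases hg : idx.get? (key n) with
      | none =>
        rw [ih]
        dsimp only
        rw [PySem.Dict.get?_insert_of_ne _ _ hne]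
      | some cur =>
        by_cases hlt : PySem.Str.len cur < PySem.Str.len n
        · rw [ih]
          dsimp only
          rw [if_pos hlt, PySem.Dict.get?_insert_of_ne _ _ hne]
        · rw [ih]
          dsimp only
          rw [if_neg hlt]

-- ===== VERDICT (by name: the statement is the Claim_ definition above) =====
theorem preprocess_character_names_py_spec : Claim_equal_preprocess_character_names_py := by
  intro names _
  unfold Spec_preprocess_character_names_py preprocess_character_names_py preprocess_character_names_py_alt
  by_cases hnil : names = []
  · rw [if_pos hnil, if_pos hnil]
  · rw [if_neg hnil, if_neg hnil]
    dsimp only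
    have hcm : (PySem.List.sorted names (fun s => PySem.Str.len s) true).foldl pvStepA PySem.Dict.empty
             = (PySem.List.sorted names (fun s => PySem.Str.len s) true).foldl pvStepB PySem.Dict.empty := by
      apply pvFold_eq _ _ (PySem.List.sorted_pairwise_rev names _)
      intro x _ p hp
      simp [PySem.Dict.empty] at hp
    rw [hcm]
    set cm := (PySem.List.sorted names (fun s => PySem.Str.len s) true).foldl pvStepB PySem.Dict.empty with hcmdef
    have hkeys : cm.keys = PySem.Set.ofList (PySem.List.sorted names (fun s => PySem.Str.len s) true) := by
      rw [hcmdef]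
      have h1 : (List.foldl (fun (d : PySem.Dict String String) x => d.insert x (pvCanonB d x)) PySem.Dict.empty
          (PySem.List.sorted names (fun s => PySem.Str.len s) true)).keys
          = PySem.Set.update PySem.Dict.empty.keys (PySem.List.sorted names (fun s => PySem.Str.len s) true) :=
        PySem.Dict.keys_foldl_insert _ _ _
      exact h1
    have hget : ∀ n ∈ names, cm.get? n = some (cm.getD n (PySem.Str.lower n)) := by
      intro n hn
      have hk : n ∈ cm.keys := by
        rw [hkeys, PySem.Set.mem_ofList, PySem.List.mem_sorted]
        exact hn
      cases hg : cm.get? n with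
      | none =>
        rw [PySem.Dict.get?_eq_none_iff_not_mem_keys] at hg
        exact absurd hk hg
      | some v => rw [PySem.Dict.getD_of_get?_eq_some _ _ hg]
    apply congrArg PySem.Dict.items
    apply PySem.List.foldl_congr_mem
    intro r name hmem
    apply congrArg (r.insert name)
    -- both sides pick, for cl := cm.getD name (lower name), the first longest name mapped to cl
    have hIdx : ∀ cl : String,
        (List.foldl (fun (idx : PySem.Dict String String) n =>
            match idx.get? (cm.getD n (PySem.Str.lower n)) with
            | none => idx.insert (cm.getD n (PySem.Str.lower n)) n
            | some cur => if PySem.Str.len cur < PySem.Str.len n then idx.insert (cm.getD n (PySem.Str.lower n)) n else idx)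
          PySem.Dict.empty names).getD cl name
        = PySem.List.maxD (names.filter (fun n => cm.getD n (PySem.Str.lower n) == cl))
            (fun s => PySem.Str.len s) name := by
      intro cl
      rw [PySem.Dict.getD_eq_get?_getD,
        pvIdx_lemma (fun n => cm.getD n (PySem.Str.lower n)) names PySem.Dict.empty cl,
        PySem.Dict.get?_empty]
      have hmax : ∀ l : List String,
          l.foldl (fun acc n => match acc with
            | none => some n
            | some m => if PySem.Str.len m < PySem.Str.len n then some n else some m) none
          = PySem.List.max? l (fun s => PySem.Str.len s) := by
        intro l
        unfold PySem.List.max?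
        apply PySem.List.foldl_congr_mem
        intro acc x _
        cases acc <;> rfl
      rw [hmax]
      rfl
    have hfilter : names.filter (fun n => cm.get? n == some (cm.getD name (PySem.Str.lower name)))
        = names.filter (fun n => cm.getD n (PySem.Str.lower n) == cm.getD name (PySem.Str.lower name)) := by
      apply List.filter_congr
      intro x hx
      rw [hget x hx]
      rfl
    rw [hfilter, hIdx]
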